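-- pv_equiv track=rewrite | github.com/YanivHajaj/Metastability-Containing-Hardware-Final-Project | Metastability_Final.py | generate_combinations_list
-- ===== SOURCE A (Python) =====
-- def generate_combinations_list(bitset):
--     # Replace 'M' in bitset with both possibilities '0' and '1'
--     combinations = []
--     if 'M' in bitset:
--         # Generate combinations for 'M' by replacing it with '0' and '1'
--         for bit in ['0', '1']:
--             combinations += generate_combinations_list(bitset.replace('M', bit, 1))
--     else:
--         # No 'M' found, add the bitset as is
--         combinations.append(bitset)
--
--     return combinations
-- ===== SOURCE B (Python) =====
-- def generate_combinations_list(bitset):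
--     # Single left-to-right pass: extend every partial result by the next
--     # character, splitting into '0'/'1' at each 'M'; join at the end.
--     combos = [[]]
--     for ch in bitset:
--         if ch == 'M':
--             combos = [c + [bit] for c in combos for bit in ('0', '1')]
--         else:
--             for c in combos:
--                 c.append(ch)
--     return [''.join(c) for c in combos]
-- ===== Notes on version B (the rewrite author's own statement) =====
-- stated objective: alternative
-- what changed: Replaced the recursion that rescans the whole string and re-replaces its first wildcard at every node of a binary call tree with a single left-to-right fold that extends all partial results at once, splitting at each wildcard.
import Mathlib
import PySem

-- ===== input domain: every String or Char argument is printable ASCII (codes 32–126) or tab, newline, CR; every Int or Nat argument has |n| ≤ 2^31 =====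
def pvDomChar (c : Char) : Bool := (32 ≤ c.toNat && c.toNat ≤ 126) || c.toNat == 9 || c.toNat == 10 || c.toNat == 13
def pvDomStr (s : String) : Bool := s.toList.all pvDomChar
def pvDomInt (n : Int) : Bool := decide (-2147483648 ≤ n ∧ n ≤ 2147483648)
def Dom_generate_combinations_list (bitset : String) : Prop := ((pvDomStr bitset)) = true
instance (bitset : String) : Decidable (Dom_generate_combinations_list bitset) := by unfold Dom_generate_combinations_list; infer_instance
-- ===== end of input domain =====

-- B replaces A's first-'M' re-replacing recursion by one left-to-right fold over the characters
-- (same return values; no side effects in either).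

-- ===== PORT A =====
-- s.replace('M', b, 1): replace the FIRST occurrence of 'M' (exact: single scan, first match only)
def pvReplaceFirstM (cs : List Char) (b : Char) : List Char :=
  match cs with
  | [] => []
  | c :: rest => if c = 'M' then b :: rest else c :: pvReplaceFirstM rest b

theorem pvReplaceFirstM_count (cs : List Char) (b : Char) (hb : b ≠ 'M')
    (h : 'M' ∈ cs) : (pvReplaceFirstM cs b).count 'M' + 1 = cs.count 'M' := by
  induction cs with
  | nil => cases h
  | cons c rest ih =>
    by_cases hc : c = 'M'
    · subst hc
      simp [pvReplaceFirstM, hb]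
    · have hmem : 'M' ∈ rest := by
        rcases List.mem_cons.mp h with h' | h'
        · exact absurd h'.symm hc
        · exact h'
      simp [pvReplaceFirstM, hc, ← ih hmem]

-- recursive body of A, on the char list
def pvGoA (cs : List Char) : List (List Char) :=
  if h : 'M' ∈ cs then
    pvGoA (pvReplaceFirstM cs '0') ++ pvGoA (pvReplaceFirstM cs '1')
  else [cs]
termination_by cs.count 'M'
decreasing_by
  · have := pvReplaceFirstM_count cs '0' (by decide) h; omega
  · have := pvReplaceFirstM_count cs '1' (by decide) h; omega

def generate_combinations_list (bitset : String) : List String :=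
  (pvGoA bitset.toList).map String.ofList

-- ===== PORT B =====
-- one step of Source B's loop: extend each partial string by the next character
def pvStepB (acc : List (List Char)) (ch : Char) : List (List Char) :=
  if ch = 'M' then acc.flatMap (fun c => [c ++ ['0'], c ++ ['1']])
  else acc.map (fun c => c ++ [ch])

def generate_combinations_list_alt (bitset : String) : List String :=
  (bitset.toList.foldl pvStepB [[]]).map String.ofList

-- ===== PRECONDITION & SPEC =====
def Spec_generate_combinations_list (bitset : String) (out : List String) : Prop := out = generate_combinations_list_alt bitset
instance (bitset : String) (out : List String) : Decidable (Spec_generate_combinations_list bitset out) := by unfold Spec_generate_combinations_list; infer_instance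

-- ===== CLAIM (what is proved, stated in full; the proofs are below) =====
def Claim_equal_generate_combinations_list : Prop := ∀ (bitset : String), Dom_generate_combinations_list bitset → Spec_generate_combinations_list bitset (generate_combinations_list bitset)

-- ===== LEMMAS AND PROOFS =====

-- structural characterisation both ports are reduced to
def pvExpand (cs : List Char) : List (List Char) :=
  match cs with
  | [] => [[]]
  | c :: rest =>
    if c = 'M' then (pvExpand rest).map ('0' :: ·) ++ (pvExpand rest).map ('1' :: ·)
    else (pvExpand rest).map (c :: ·)

theorem pvExpand_split (cs : List Char) (h : 'M' ∈ cs) :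
    pvExpand cs = pvExpand (pvReplaceFirstM cs '0') ++ pvExpand (pvReplaceFirstM cs '1') := by
  induction cs with
  | nil => cases h
  | cons c rest ih =>
    by_cases hc : c = 'M'
    · subst hc
      simp [pvReplaceFirstM, pvExpand]
    · have hmem : 'M' ∈ rest := by
        rcases List.mem_cons.mp h with h' | h'
        · exact absurd h'.symm hc
        · exact h'
      simp [pvReplaceFirstM, hc, pvExpand, ih hmem]

theorem pvExpand_noM (cs : List Char) (hno : 'M' ∉ cs) : pvExpand cs = [cs] := by
  induction cs with
  | nil => rfl
  | cons c rest ih =>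
    have hc : c ≠ 'M' := fun e => hno (e ▸ List.mem_cons_self ..)
    have hrest : 'M' ∉ rest := fun m => hno (List.mem_cons_of_mem _ m)
    simp [pvExpand, hc, ih hrest]

theorem pvGoA_eq_expand (cs : List Char) : pvGoA cs = pvExpand cs := by
  induction cs using pvGoA.induct with
  | case1 cs h ih0 ih1 =>
    rw [pvGoA, dif_pos h, ih0, ih1, pvExpand_split cs h]
  | case2 cs h =>
    rw [pvGoA, dif_neg h, pvExpand_noM cs h]

theorem pvFoldB_eq (cs : List Char) (acc : List (List Char)) :
    cs.foldl pvStepB acc = acc.flatMap (fun x => (pvExpand cs).map (x ++ ·)) := by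
  induction cs generalizing acc with
  | nil => simp [pvExpand]
  | cons c rest ih =>
    by_cases hc : c = 'M'
    · subst hc
      rw [List.foldl_cons, ih]
      simp only [pvStepB, pvExpand, if_true, List.flatMap_assoc]
      apply List.flatMap_congr
      intro c _
      simp [Function.comp_def]
    · rw [List.foldl_cons, ih]
      simp [pvStepB, hc, pvExpand, List.flatMap_def, Function.comp_def]

-- ===== VERDICT (by name: the statement is the Claim_ definition above) =====
theorem generate_combinations_list_spec : Claim_equal_generate_combinations_list := by
  intro bitset _
  unfold Spec_generate_combinations_list generate_combinations_list generate_combinations_list_alt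
  rw [pvGoA_eq_expand, pvFoldB_eq]
  simp
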